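-- pv_equiv track=rewrite | github.com/ynop/audiomate | audiomate/corpus/io/swc.py | find_audio_file_for_segment
-- ===== SOURCE A (Python) =====
-- def find_audio_file_for_segment(start, end, audio_files):
--     """
--     Find the correct audio file for the segment.
--     Return index of matching audio file.
--     """
--
--     items = sorted(audio_files.items(), key=lambda x: x[1])
--
--     for i in range(len(items) - 1):
--         if end <= items[i+1][1]:
--             # Segment belongs to audiofile i
--             if start >= items[i][1]:
--                 return items[i][0]
--
--             # Segment crosses audiofile boundaries, ignore
--             else:
--                 return None
--
--     if start >= items[-1][1]:
--         return items[-1][0]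
--     else:
--         return None
-- ===== SOURCE B (Python) =====
-- def find_audio_file_for_segment(start, end, audio_files):
--     """
--     Find the correct audio file for the segment.
--     Return index of matching audio file.
--     """
--     items = sorted(audio_files.items(), key=lambda x: x[1])
--     boundaries = [v for _, v in items]
--
--     # bisect_left: first index whose boundary is >= end
--     lo, hi = 0, len(boundaries)
--     while lo < hi:
--         mid = (lo + hi) // 2
--         if boundaries[mid] < end:
--             lo = mid + 1
--         else:
--             hi = mid
--     i = lo - 1 if lo > 0 else 0
--
--     if start >= boundaries[i]:
--         return items[i][0]
--     return None
-- ===== Notes on version B (the rewrite author's own statement) =====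
-- stated objective: alternative
-- what changed: The linear first-match scan over consecutive sorted boundaries is replaced by a binary search (hand-rolled bisect_left) on the boundary list: i = max(lo-1, 0) locates the segment's file in one index lookup instead of a left-to-right scan.
import Mathlib
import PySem

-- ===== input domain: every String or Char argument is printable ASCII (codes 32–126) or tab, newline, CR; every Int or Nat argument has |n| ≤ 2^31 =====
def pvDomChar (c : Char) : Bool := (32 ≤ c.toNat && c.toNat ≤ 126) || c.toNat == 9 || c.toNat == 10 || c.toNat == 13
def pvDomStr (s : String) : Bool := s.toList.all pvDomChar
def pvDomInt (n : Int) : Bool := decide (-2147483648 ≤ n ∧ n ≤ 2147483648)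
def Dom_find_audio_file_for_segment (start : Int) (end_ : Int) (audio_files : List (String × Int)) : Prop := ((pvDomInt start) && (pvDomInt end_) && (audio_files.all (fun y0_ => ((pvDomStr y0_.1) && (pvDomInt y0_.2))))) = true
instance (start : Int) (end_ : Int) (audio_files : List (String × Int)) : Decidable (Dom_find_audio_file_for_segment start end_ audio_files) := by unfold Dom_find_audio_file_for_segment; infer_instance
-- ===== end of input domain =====

-- B replaces A's linear first-match scan over the sorted boundaries by a binary search
-- (hand-rolled bisect_left) on the boundary list; same sort, same tie/boundary semantics.
-- Pre_ excludes the empty dict, on which both A and B raise IndexError.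


-- ===== PORT A =====
-- fall-through code after A's for-loop: items[-1] lookup (none = IndexError, excluded by Pre_)
def aFinish (start : Int) (items : List (String × Int)) : Option String :=
  match PySem.List.pyGet? items (-1) with
  | some last => if start ≥ last.2 then some last.1 else none
  | none => none

-- A's for-loop over range(len(items)-1), with early return
def aLoop (start end_ : Int) (items : List (String × Int)) : List Int → Option String
  | [] => aFinish start items
  | i :: rest =>
    match PySem.List.pyGet? items (i + 1) with
    | some nxt =>
      if end_ ≤ nxt.2 then
        match PySem.List.pyGet? items i with
        | some cur => if start ≥ cur.2 then some cur.1 else none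
        | none => none
      else aLoop start end_ items rest
    | none => none

def find_audio_file_for_segment (start : Int) (end_ : Int) (audio_files : List (String × Int)) : Option String :=
  let items := PySem.List.sorted audio_files (fun x => x.2)
  aLoop start end_ items (PySem.List.pyRange 0 ((items.length : Int) - 1) 1)

-- ===== PORT B =====
-- hand-rolled bisect_left from Source B: while lo < hi: mid = (lo+hi)//2; …
def bsLoop (b : List Int) (end_ : Int) (lo hi : Nat) : Nat :=
  if _h : lo < hi then
    match b[(lo + hi) / 2]? with
    | some v => if v < end_ then bsLoop b end_ ((lo + hi) / 2 + 1) hi else bsLoop b end_ lo ((lo + hi) / 2)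
    | none => lo
  else lo
termination_by hi - lo
decreasing_by all_goals omega

def find_audio_file_for_segment_alt (start : Int) (end_ : Int) (audio_files : List (String × Int)) : Option String :=
  let items := PySem.List.sorted audio_files (fun x => x.2)
  let boundaries := items.map Prod.snd
  let lo := bsLoop boundaries end_ 0 boundaries.length
  let i : Nat := if 0 < lo then lo - 1 else 0
  match boundaries[i]?, items[i]? with
  | some bi, some it => if start ≥ bi then some it.1 else none
  | _, _ => none

-- ===== PRECONDITION & SPEC =====
-- Pre_ excludes exactly the empty dict: there A (items[-1]) raises IndexError (and B's boundaries[i] does too).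
def Pre_find_audio_file_for_segment (start : Int) (end_ : Int) (audio_files : List (String × Int)) : Prop :=
  audio_files ≠ []
instance (start : Int) (end_ : Int) (audio_files : List (String × Int)) : Decidable (Pre_find_audio_file_for_segment start end_ audio_files) := by unfold Pre_find_audio_file_for_segment; infer_instance

def pvWitness_find_audio_file_for_segment : Int × Int × (List (String × Int)) := (5, 7, [("a", 0), ("b", 10)])

def Spec_find_audio_file_for_segment (start : Int) (end_ : Int) (audio_files : List (String × Int)) (out : Option String) : Prop := out = find_audio_file_for_segment_alt start end_ audio_files
instance (start : Int) (end_ : Int) (audio_files : List (String × Int)) (out : Option String) : Decidable (Spec_find_audio_file_for_segment start end_ audio_files out) := by unfold Spec_find_audio_file_for_segment; infer_instance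

-- ===== CLAIM (what is proved, stated in full; the proofs are below) =====
def Claim_equal_find_audio_file_for_segment : Prop := ∀ (start : Int) (end_ : Int) (audio_files : List (String × Int)), Dom_find_audio_file_for_segment start end_ audio_files → Pre_find_audio_file_for_segment start end_ audio_files → Spec_find_audio_file_for_segment start end_ audio_files (find_audio_file_for_segment start end_ audio_files)

-- ===== LEMMAS AND PROOFS =====

-- binary-search invariant: bsLoop returns the first index with end_ ≤ b[k] (or b.length)
theorem bsLoop_spec (b : List Int) (end_ : Int)
    (hsort : ∀ (p q : Nat) (hpq : p ≤ q) (hq : q < b.length), b[p]'(by omega) ≤ b[q])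
    (lo hi : Nat) (hlh : lo ≤ hi) (hhi : hi ≤ b.length)
    (hlo_inv : ∀ j : Nat, j < lo → (hj : j < b.length) → b[j] < end_)
    (hhi_inv : ∀ j : Nat, hi ≤ j → (hj : j < b.length) → end_ ≤ b[j]) :
    lo ≤ bsLoop b end_ lo hi ∧ bsLoop b end_ lo hi ≤ hi ∧
    (∀ j : Nat, j < bsLoop b end_ lo hi → (hj : j < b.length) → b[j] < end_) ∧
    (∀ j : Nat, bsLoop b end_ lo hi ≤ j → (hj : j < b.length) → end_ ≤ b[j]) := by
  rcases Nat.lt_or_ge lo hi with h | h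
  · have hmidlen : (lo + hi) / 2 < b.length := by omega
    rw [bsLoop]
    simp only [dif_pos h, List.getElem?_eq_getElem hmidlen]
    by_cases hv : b[(lo + hi) / 2] < end_
    · simp only [if_pos hv]
      have hrec := bsLoop_spec b end_ hsort ((lo + hi) / 2 + 1) hi (by omega) hhi
        (fun j hj hjlen => by
          rcases Nat.lt_or_ge j lo with hc | hc
          · exact hlo_inv j hc hjlen
          · exact lt_of_le_of_lt (hsort j ((lo + hi) / 2) (by omega) hmidlen) hv)
        hhi_inv
      exact ⟨by omega, hrec.2.1, hrec.2.2.1, hrec.2.2.2⟩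
    · simp only [if_neg hv]
      have hrec := bsLoop_spec b end_ hsort lo ((lo + hi) / 2) (by omega) (by omega)
        hlo_inv
        (fun j hj hjlen =>
          le_trans (not_lt.mp hv) (hsort ((lo + hi) / 2) j hj hjlen))
      exact ⟨hrec.1, by omega, hrec.2.2.1, hrec.2.2.2⟩
  · have heq : lo = hi := by omega
    rw [bsLoop]
    simp only [dif_neg (by omega : ¬ lo < hi)]
    exact ⟨le_refl _, by omega, hlo_inv, fun j hj => hhi_inv j (by omega)⟩
termination_by hi - lo
decreasing_by all_goals omega

-- answer at index i (what both programs compute once the file index is known)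
def pvAnswer (start : Int) (items : List (String × Int)) (i : Nat) : Option String :=
  match items[i]? with
  | some it => if start ≥ it.2 then some it.1 else none
  | none => none

-- A's scan from index a returns the answer at i* = (if k = 0 then 0 else k - 1)
theorem aLoop_range_eq (start end_ : Int) (items : List (String × Int)) (k : Nat)
    (hne : items ≠ [])
    (hk_le : k ≤ items.length)
    (hk_lt : ∀ j : Nat, j < k → (hj : j < items.length) → (items[j]).2 < end_)
    (hk_ge : ∀ j : Nat, k ≤ j → (hj : j < items.length) → end_ ≤ (items[j]).2)
    (a : Nat) (ha : a ≤ items.length - 1)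
    (hai : a ≤ (if 0 < k then k - 1 else 0)) :
    aLoop start end_ items (PySem.List.pyRange (a : Int) ((items.length : Int) - 1) 1)
      = pvAnswer start items (if 0 < k then k - 1 else 0) := by
  have hn : 1 ≤ items.length := List.length_pos_iff.mpr hne
  rcases Nat.lt_or_ge a (items.length - 1) with hla | hla
  · rw [PySem.List.pyRange_one_cons (by omega)]
    have hcast : (a : Int) + 1 = ((a + 1 : Nat) : Int) := by push_cast; ring
    have ha1 : a + 1 < items.length := by omega
    rw [aLoop, hcast, PySem.List.pyGet?_natCast, List.getElem?_eq_getElem ha1]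
    by_cases hcond : end_ ≤ (items[a + 1]).2
    · have hka : (if 0 < k then k - 1 else 0) = a := by
        have hkle : k ≤ a + 1 := by
          by_contra hc
          exact absurd hcond (not_le.mpr (hk_lt (a + 1) (by omega) ha1))
        rcases Nat.eq_zero_or_pos k with h0 | h0
        · simp only [if_neg (by omega : ¬ 0 < k)] at hai ⊢; omega
        · simp only [if_pos h0] at hai ⊢; omega
      simp only [if_pos hcond, PySem.List.pyGet?_natCast,
        List.getElem?_eq_getElem (by omega : a < items.length), hka, pvAnswer]
    · have hk2 : a + 2 ≤ k := by
        by_contra hc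
        exact absurd (hk_ge (a + 1) (by omega) ha1) (not_le.mpr (not_le.mp hcond))
      have hnext : a + 1 ≤ (if 0 < k then k - 1 else 0) := by
        rw [if_pos (by omega : 0 < k)]; omega
      simp only [if_neg hcond]
      exact aLoop_range_eq start end_ items k hne hk_le hk_lt hk_ge (a + 1) (by omega) hnext
  · have hhai : (if 0 < k then k - 1 else 0) = items.length - 1 := by
      rcases Nat.eq_zero_or_pos k with h0 | h0
      · simp only [if_neg (by omega : ¬ 0 < k)] at hai ⊢; omega
      · simp only [if_pos h0] at hai ⊢; omega
    rw [PySem.List.pyRange_one_eq_nil (by omega), aLoop, aFinish,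
      PySem.List.pyGet?_neg_one, List.getLast?_eq_getElem?,
      List.getElem?_eq_getElem (by omega : items.length - 1 < items.length)]
    simp only [pvAnswer, hhai, List.getElem?_eq_getElem (by omega : items.length - 1 < items.length)]
termination_by items.length - 1 - a
decreasing_by omega

-- ===== VERDICT (by name: the statement is the Claim_ definition above) =====
theorem find_audio_file_for_segment_spec : Claim_equal_find_audio_file_for_segment := by
  intro start end_ audio_files _hdom hne
  unfold Spec_find_audio_file_for_segment find_audio_file_for_segment find_audio_file_for_segment_alt
  set items := PySem.List.sorted audio_files (fun x => x.2) with hitems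
  set b := items.map Prod.snd with hb
  have hne' : items ≠ [] := by
    rw [hitems, Ne, PySem.List.sorted_eq_nil_iff]; exact hne
  have hn : 1 ≤ items.length := List.length_pos_iff.mpr hne'
  have hblen : b.length = items.length := by simp [hb]
  have hsort : ∀ (p q : Nat) (hpq : p ≤ q) (hq : q < b.length), b[p]'(by omega) ≤ b[q] := by
    intro p q hpq hq
    have hq' : q < items.length := by omega
    have := PySem.List.key_sorted_getElem_mono (xs := audio_files) (key := fun x => x.2)
      hpq (by rw [← hitems]; exact hq')
    simpa [hb, List.getElem_map] using this
  obtain ⟨hk0, hkhi, hklt, hkge⟩ := bsLoop_spec b end_ hsort 0 b.length (by omega) le_rfl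
    (fun j hj _ => absurd hj (Nat.not_lt_zero j)) (fun j hj hjlen => absurd hj (by omega))
  set k := bsLoop b end_ 0 b.length with hk
  set i : Nat := if 0 < k then k - 1 else 0 with hi
  have hilen : i < items.length := by
    rcases Nat.eq_zero_or_pos k with h0 | h0
    · simp only [hi, if_neg (by omega : ¬ 0 < k)]; omega
    · simp only [hi, if_pos h0]; omega
  have hA := aLoop_range_eq start end_ items k hne' (by omega)
    (fun j hj hjlen => by
      have := hklt j hj (by omega)
      simpa [hb, List.getElem_map] using this)
    (fun j hj hjlen => by
      have := hkge j hj (by omega)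
      simpa [hb, List.getElem_map] using this)
    0 (by omega) (Nat.zero_le _)
  rw [show ((0 : Int) = ((0 : Nat) : Int)) from rfl, hA]
  show pvAnswer start items i =
    (match b[i]?, items[i]? with
      | some bi, some it => if start ≥ bi then some it.1 else none
      | _, _ => none)
  rw [List.getElem?_eq_getElem (show i < b.length by omega), List.getElem?_eq_getElem hilen]
  simp only [pvAnswer, List.getElem?_eq_getElem hilen, hb, List.getElem_map]
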